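-- pv_equiv track=rewrite | github.com/Blackdeer1524/Dict2Flashcards | src/plugins_loading/factory.py | get_enumerated_names
-- ===== SOURCE A (Python) =====
-- from collections import Counter
-- from typing import (Callable, ClassVar, Generator, Generic, Iterable, Optional,
--                     Type, TypeVar, Union)
--
-- def get_enumerated_names(names: Iterable[str]) -> list[str]:
--     seen_names_count = Counter(names)
--     seen_so_far = {key: value for key, value in seen_names_count.items()}
--     enum_names = []
--     for name in names:
--         if seen_names_count[name] == 1:
--             enum_names.append(name)
--         else:
--             seen_so_far[name] -= 1
--             enum_names.append(f"{name} [{seen_names_count[name] - seen_so_far[name]}]")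
--     return enum_names
-- ===== SOURCE B (Python) =====
-- from collections import Counter
--
-- def get_enumerated_names(names):
--     counts = Counter(names)
--     result = []
--     positions = {}
--     for i, name in enumerate(names):
--         result.append(name)
--         positions.setdefault(name, []).append(i)
--     for name, pos_list in positions.items():
--         if counts[name] > 1:
--             for rank, pos in enumerate(pos_list, 1):
--                 result[pos] = f"{name} [{rank}]"
--     return result
-- ===== Notes on version B (the rewrite author's own statement) =====
-- stated objective: alternative
-- what changed: Replaced A's single streaming pass with a running decrement dict by a build-index-then-scatter decomposition: one pass records each name's positions in a dict while copying the raw names into the result, then for each duplicated name its recorded positions are overwritten in order with the 1-based rank suffix.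
import Mathlib
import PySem

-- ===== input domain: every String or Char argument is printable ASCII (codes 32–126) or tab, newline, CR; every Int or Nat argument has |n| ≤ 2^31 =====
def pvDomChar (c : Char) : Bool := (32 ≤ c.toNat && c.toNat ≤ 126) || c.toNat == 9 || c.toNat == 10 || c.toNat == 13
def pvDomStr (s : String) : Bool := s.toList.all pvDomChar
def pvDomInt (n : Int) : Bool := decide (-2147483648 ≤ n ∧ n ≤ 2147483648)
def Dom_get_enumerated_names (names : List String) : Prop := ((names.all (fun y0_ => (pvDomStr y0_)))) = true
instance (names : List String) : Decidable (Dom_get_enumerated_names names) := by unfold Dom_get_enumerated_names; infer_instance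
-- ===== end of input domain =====

-- B replaces A's streaming loop with a running decrement dict by a build-index-then-scatter
-- decomposition (alternative algorithm, similar cost; equal return value proved below).

-- ===== PORT A =====
def get_enumerated_names (names : List String) : List String :=
  let seen_names_count : PySem.Dict String Int := PySem.Dict.counter names
  -- dict comprehension {key: value for key, value in seen_names_count.items()}
  let seen_so_far : PySem.Dict String Int :=
    seen_names_count.items.foldl (fun d p => d.insert p.1 p.2) PySem.Dict.empty
  (names.foldl
    (fun (st : PySem.Dict String Int × List String) name =>
      if seen_names_count.getD name 0 = 1 then
        (st.1, st.2 ++ [name])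
      else
        let s2 := st.1.modify name 0 (· - 1)
        (s2, st.2 ++ [name ++ " [" ++ PySem.Int.toStr (seen_names_count.getD name 0 - s2.getD name 0) ++ "]"]))
    (seen_so_far, ([] : List String))).2

-- ===== PORT B =====
def get_enumerated_names_alt (names : List String) : List String :=
  let counts : PySem.Dict String Int := PySem.Dict.counter names
  let rp :=
    (PySem.List.enumerate names).foldl
      (fun (st : List String × PySem.Dict String (List Int)) p =>
        (st.1 ++ [p.2], st.2.modify p.2 [] (· ++ [p.1])))
      (([] : List String), PySem.Dict.empty)
  rp.2.items.foldl
    (fun (res : List String) q =>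
      if counts.getD q.1 0 > 1 then
        (PySem.List.enumerate q.2 1).foldl
          (fun r pr => PySem.List.pySetD r pr.2 (q.1 ++ " [" ++ PySem.Int.toStr pr.1 ++ "]"))
          res
      else res)
    rp.1

-- ===== PRECONDITION & SPEC =====
def Spec_get_enumerated_names (names : List String) (out : List String) : Prop := out = get_enumerated_names_alt names
instance (names : List String) (out : List String) : Decidable (Spec_get_enumerated_names names out) := by unfold Spec_get_enumerated_names; infer_instance

-- ===== CLAIM (what is proved, stated in full; the proofs are below) =====
def Claim_equal_get_enumerated_names : Prop := ∀ (names : List String), Dom_get_enumerated_names names → Spec_get_enumerated_names names (get_enumerated_names names)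

-- ===== LEMMAS AND PROOFS =====

-- The dict comprehension over the counter's items rebuilds the counter itself.
lemma seen_so_far_eq (names : List String) :
    (PySem.Dict.counter names).items.foldl
      (fun (d : PySem.Dict String Int) p => d.insert p.1 p.2) PySem.Dict.empty
      = PySem.Dict.counter names := by
  apply PySem.Dict.ext
  rw [PySem.Dict.items_foldl_insert_fresh (k := Prod.fst) (v := Prod.snd)
        (d := PySem.Dict.empty) (l := (PySem.Dict.counter names).items)
        (by intro a _; simp [PySem.Dict.contains_empty])
        (by simpa [PySem.Dict.keys] using PySem.Dict.nodup_keys_counter (xs := names))]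
  simp [show (PySem.Dict.empty : PySem.Dict String Int).items = [] from rfl]

-- Loop invariant for A's fold: after consuming `pre`, the running dict maps every
-- still-to-come name k to count_full(k) - count_pre(k), and the remaining loop emits
-- exactly B's elements for the remaining (index, name) pairs.
lemma loopA (full : List String) :
    ∀ (rest pre : List String) (seen : PySem.Dict String Int) (acc : List String),
      full = pre ++ rest →
      (∀ k, k ∈ rest → seen.getD k 0 = (full.count k : Int) - (pre.count k : Int)) →
      (rest.foldl
        (fun (st : PySem.Dict String Int × List String) name =>
          if (PySem.Dict.counter full).getD name 0 = 1 then
            (st.1, st.2 ++ [name])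
          else
            let s2 := st.1.modify name 0 (· - 1)
            (s2, st.2 ++ [name ++ " [" ++ PySem.Int.toStr ((PySem.Dict.counter full).getD name 0 - s2.getD name 0) ++ "]"]))
        (seen, acc)).2
      = acc ++ (PySem.List.enumerate rest (pre.length : Int)).map (fun p =>
          if full.count p.2 = 1 then p.2
          else p.2 ++ " [" ++ PySem.Int.toStr (((PySem.List.slice full none (some (p.1 + 1))).count p.2 : Int)) ++ "]") := by
  intro rest
  induction rest with
  | nil => intro pre seen acc _ _; simp [PySem.List.enumerate_nil]
  | cons n t ih =>
    intro pre seen acc hfull hinv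
    rw [List.foldl_cons, PySem.List.enumerate_cons, List.map_cons]
    have hcnt : (PySem.Dict.counter full).getD n 0 = (full.count n : Int) :=
      PySem.Dict.getD_counter full n
    have htake : PySem.List.slice full none (some ((pre.length : Int) + 1)) = pre ++ [n] := by
      have h1 : ((pre.length : Int) + 1) = ((pre.length + 1 : Nat) : Int) := by push_cast; ring
      rw [h1, PySem.List.slice_to_natCast, hfull]
      simp [List.take_append]
    by_cases h1 : full.count n = 1
    · -- unique name: appended as-is, dict untouched
      rw [if_pos (by rw [hcnt, h1]; rfl), if_pos h1]
      rw [ih (pre ++ [n]) seen (acc ++ [n]) (by rw [hfull]; simp) ?_]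
      · simp
      · intro k hk
        by_cases hkn : k = n
        · exfalso
          subst hkn
          have : 1 ≤ t.count k := List.count_pos_iff.mpr hk
          have : full.count k = pre.count k + (1 + t.count k) := by
            rw [hfull]; simp [List.count_append]; omega
          omega
        · have := hinv k (List.mem_cons_of_mem n hk)
          have hpre : (pre ++ [n]).count k = pre.count k := by
            simp [List.count_append, List.count_singleton]
            intro h; exact absurd h.symm hkn
          rw [hpre]; exact this
    · -- duplicate: appended with the 1-based occurrence number
      rw [if_neg (by rw [hcnt]; exact_mod_cast (by omega : ¬ (full.count n : Int) = 1)), if_neg h1]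
      have hseen : seen.getD n 0 = (full.count n : Int) - (pre.count n : Int) :=
        hinv n (List.mem_cons_self)
      have hmod : (seen.modify n 0 (· - 1)).getD n 0
          = (full.count n : Int) - (pre.count n : Int) - 1 := by
        rw [PySem.Dict.getD_modify_self, hseen]
      have hval : (PySem.Dict.counter full).getD n 0 - (seen.modify n 0 (· - 1)).getD n 0
          = (((pre ++ [n]).count n : Nat) : Int) := by
        rw [hcnt, hmod]
        simp [List.count_append]
        ring
      rw [ih (pre ++ [n]) (seen.modify n 0 (· - 1))
            (acc ++ [n ++ " [" ++ PySem.Int.toStr ((PySem.Dict.counter full).getD n 0 - (seen.modify n 0 (· - 1)).getD n 0) ++ "]"])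
            (by rw [hfull]; simp) ?_]
      · rw [hval, htake]
        simp
      · intro k hk
        by_cases hkn : k = n
        · subst hkn
          rw [PySem.Dict.getD_modify_self, hseen]
          have : (pre ++ [k]).count k = pre.count k + 1 := by
            simp [List.count_append]
          rw [this]; push_cast; ring
        · rw [PySem.Dict.getD_modify_of_ne seen 0 _ hkn,
              hinv k (List.mem_cons_of_mem n hk)]
          have hpre : (pre ++ [n]).count k = pre.count k := by
            simp [List.count_append, List.count_singleton]
            intro h; exact absurd h.symm hkn
          rw [hpre]

-- the common closed form both ports are reduced to
def pvShape (full : List String) : List String :=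
  (PySem.List.enumerate full).map (fun p =>
    if full.count p.2 = 1 then p.2
    else p.2 ++ " [" ++ PySem.Int.toStr (((PySem.List.slice full none (some (p.1 + 1))).count p.2 : Int)) ++ "]")

lemma A_eq_shape (names : List String) : get_enumerated_names names = pvShape names := by
  simp only [get_enumerated_names, seen_so_far_eq, pvShape]
  rw [loopA names names [] (PySem.Dict.counter names) []
        (by simp)
        (by intro k _; rw [PySem.Dict.getD_counter names k]; simp)]
  simp

-- indices (from offset s) at which `c` occurs in `full`, in order
def pvIdx (full : List String) (s : Int) (c : String) : List Int :=
  ((PySem.List.enumerate full s).filter (fun p => p.2 == c)).map (·.1)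

lemma mem_pvIdx {full : List String} {s : Int} {c : String} {i : Int}
    (h : i ∈ pvIdx full s c) : ∃ k, ∃ _ : k < full.length, i = s + k ∧ full[k] = c := by
  obtain ⟨p, hp, rfl⟩ := List.mem_map.mp h
  obtain ⟨hpe, hpc⟩ := List.mem_filter.mp hp
  obtain ⟨k, hk, rfl⟩ := (PySem.List.mem_enumerate_iff full s p).mp hpe
  exact ⟨k, hk, rfl, by simpa using hpc⟩

lemma nodup_pvIdx (full : List String) (s : Int) (c : String) : (pvIdx full s c).Nodup := by
  have h1 := (PySem.List.pairwise_lt_enumerate full s).filter (fun p => p.2 == c)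
  have h2 : (pvIdx full s c).Pairwise (· < ·) := List.pairwise_map.mpr h1
  exact h2.imp Int.ne_of_lt

-- rank lookup: the j-th element of full being c, its entry in the enumerated index
-- list of c carries rank r + (count of c before j)
lemma find_rank (c : String) :
    ∀ (full : List String) (s r : Int) (j : Nat) (hj : j < full.length), full[j] = c →
      (PySem.List.enumerate (pvIdx full s c) r).find? (fun pr => pr.2 == s + (j : Int))
        = some (r + ((full.take j).count c : Int), s + (j : Int)) := by
  intro full
  induction full with
  | nil => intro s r j hj; exact absurd hj (by simp)
  | cons x t ih =>
    intro s r j hj hc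
    by_cases hx : x = c
    · have hidx : pvIdx (x :: t) s c = s :: pvIdx t (s + 1) c := by
        simp [pvIdx, PySem.List.enumerate_cons, hx]
      rw [hidx, PySem.List.enumerate_cons]
      match j with
      | 0 =>
        rw [List.find?_cons_of_pos (by simp)]
        simp
      | Nat.succ j' =>
        rw [List.find?_cons_of_neg (by simp; omega)]
        have hj' : j' < t.length := by simpa using hj
        have hc' : t[j'] = c := by simpa using hc
        rw [show ((j'.succ : Nat) : Int) = (j' : Int) + 1 from by push_cast; ring]
        have := ih (s + 1) (r + 1) j' hj' hc'
        rw [show s + ((j' : Int) + 1) = (s + 1) + (j' : Int) by ring, this]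
        have hcnt : (((x :: t).take (j' + 1)).count c : Int) = ((t.take j').count c : Int) + 1 := by
          simp [hx]
        rw [hcnt]
        refine congrArg some (Prod.ext ?_ ?_) <;> simp <;> try ring
    · have hidx : pvIdx (x :: t) s c = pvIdx t (s + 1) c := by
        simp [pvIdx, PySem.List.enumerate_cons, hx]
      rw [hidx]
      match j with
      | 0 => exact absurd (by simpa using hc) hx
      | Nat.succ j' =>
        have hj' : j' < t.length := by simpa using hj
        have hc' : t[j'] = c := by simpa using hc
        rw [show ((j'.succ : Nat) : Int) = (j' : Int) + 1 from by push_cast; ring]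
        have := ih (s + 1) r j' hj' hc'
        rw [show s + ((j' : Int) + 1) = (s + 1) + (j' : Int) by ring, this]
        have hcnt : (((x :: t).take (j' + 1)).count c : Int) = ((t.take j').count c : Int) := by
          simp [hx]
        rw [hcnt]

lemma find_none (c : String) (full : List String) (s r i : Int)
    (h : ∀ k, ∀ _ : k < full.length, full[k] = c → s + (k : Int) ≠ i) :
    (PySem.List.enumerate (pvIdx full s c) r).find? (fun pr => pr.2 == i) = none := by
  rw [List.find?_eq_none]
  intro pr hpr
  obtain ⟨k, hk, rfl⟩ := (PySem.List.mem_enumerate_iff _ r pr).mp hpr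
  have hmem : (pvIdx full s c)[k] ∈ pvIdx full s c := List.getElem_mem hk
  obtain ⟨m, hm, he, hc⟩ := mem_pvIdx hmem
  simp only [beq_iff_eq]
  intro hcontra
  exact h m hm hc (by rw [← he]; simpa using hcontra)

lemma scatter_length (f : Int → String) :
    ∀ (pairs : List (Int × Int)) (res : List String),
      (pairs.foldl (fun r pr => PySem.List.pySetD r pr.2 (f pr.1)) res).length = res.length := by
  intro pairs
  induction pairs with
  | nil => intro res; rfl
  | cons pr rest ih => intro res; rw [List.foldl_cons, ih]; exact PySem.List.length_pySetD _ _ _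

lemma scatter_get (f : Int → String) :
    ∀ (pairs : List (Int × Int)) (res : List String) (j : Nat), j < res.length →
      (∀ q ∈ pairs, 0 ≤ q.2) → (pairs.map (·.2)).Nodup →
      (pairs.foldl (fun r pr => PySem.List.pySetD r pr.2 (f pr.1)) res).getD j ""
        = match pairs.find? (fun pr => pr.2 == (j : Int)) with
          | some pr => f pr.1
          | none => res.getD j "" := by
  intro pairs
  induction pairs with
  | nil => intro res j hj _ _; simp
  | cons pr rest ih =>
    intro res j hj hnn hnd
    have hnn0 : (0 : Int) ≤ pr.2 := hnn pr List.mem_cons_self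
    rw [List.foldl_cons, PySem.List.pySetD_of_nonneg _ _ hnn0]
    have hlen' : j < (res.set pr.2.toNat (f pr.1)).length := by simpa using hj
    rw [ih _ j hlen' (fun q hq => hnn q (List.mem_cons_of_mem pr hq)) (List.nodup_cons.mp (by simpa using hnd)).2]
    by_cases hj2 : pr.2 = (j : Int)
    · rw [List.find?_cons_of_pos (by simpa using hj2)]
      have hnone : rest.find? (fun q => q.2 == (j : Int)) = none := by
        rw [List.find?_eq_none]
        intro q hq
        simp only [beq_iff_eq]
        intro hqe
        have : pr.2 ∈ rest.map (·.2) := by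
          rw [hj2, ← hqe]; exact List.mem_map_of_mem hq
        exact (List.nodup_cons.mp (by simpa using hnd)).1 this
      rw [hnone]
      have ht : pr.2.toNat = j := by omega
      simp [List.getD, ht, hj]
    · rw [List.find?_cons_of_neg (by simpa using hj2)]
      have ht : pr.2.toNat ≠ j := by omega
      cases hfind : rest.find? (fun q => q.2 == (j : Int)) with
      | some q => rfl
      | none => simp [List.getD, List.getElem?_set_ne ht]

lemma outer_length (full : List String) (step : List String → String × List Int → List String)
    (hstep : step = fun res q =>
      if (PySem.Dict.counter full).getD q.1 0 > 1 then
        (PySem.List.enumerate q.2 1).foldl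
          (fun r pr => PySem.List.pySetD r pr.2 (q.1 ++ " [" ++ PySem.Int.toStr pr.1 ++ "]"))
          res
      else res) :
    ∀ (items : List (String × List Int)) (res : List String),
      (items.foldl step res).length = res.length := by
  intro items
  induction items with
  | nil => intro res; rfl
  | cons q rest ih =>
    intro res
    rw [List.foldl_cons, ih]
    subst hstep
    by_cases h : (PySem.Dict.counter full).getD q.1 0 > 1
    · simp only [if_pos h]
      exact scatter_length (fun rank => q.1 ++ " [" ++ PySem.Int.toStr rank ++ "]") _ _
    · simp only [if_neg h]

lemma outer_getD (full : List String) :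
    ∀ (cs : List String) (res : List String), res.length = full.length →
      ∀ (j : Nat) (hj : j < full.length),
      ((cs.map (fun c => (c, pvIdx full 0 c))).foldl
        (fun (res : List String) q =>
          if (PySem.Dict.counter full).getD q.1 0 > 1 then
            (PySem.List.enumerate q.2 1).foldl
              (fun r pr => PySem.List.pySetD r pr.2 (q.1 ++ " [" ++ PySem.Int.toStr pr.1 ++ "]"))
              res
          else res) res).getD j ""
        = if full[j] ∈ cs ∧ 1 < full.count full[j]
          then full[j] ++ " [" ++ PySem.Int.toStr (1 + ((full.take j).count full[j] : Int)) ++ "]"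
          else res.getD j "" := by
  intro cs
  induction cs with
  | nil => intro res _ j hj; simp
  | cons c cs' ih =>
    intro res hlen j hj
    rw [List.map_cons, List.foldl_cons]
    -- the state after processing name c
    set res1 : List String :=
      (if (PySem.Dict.counter full).getD c 0 > 1 then
        (PySem.List.enumerate (pvIdx full 0 c) 1).foldl
          (fun r pr => PySem.List.pySetD r pr.2 (c ++ " [" ++ PySem.Int.toStr pr.1 ++ "]"))
          res
      else res) with hres1
    have hlen1 : res1.length = full.length := by
      rw [hres1]
      by_cases h : (PySem.Dict.counter full).getD c 0 > 1
      · rw [if_pos h, scatter_length (fun rank => c ++ " [" ++ PySem.Int.toStr rank ++ "]")]; exact hlen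
      · rw [if_neg h]; exact hlen
    rw [ih res1 hlen1 j hj]
    have hdupTest : ((PySem.Dict.counter full).getD c 0 > 1) ↔ 1 < full.count c := by
      rw [PySem.Dict.getD_counter full c]; exact_mod_cast Iff.rfl
    have hres1j : res1.getD j "" =
        if 1 < full.count c ∧ full[j] = c
        then full[j] ++ " [" ++ PySem.Int.toStr (1 + ((full.take j).count full[j] : Int)) ++ "]"
        else res.getD j "" := by
      rw [hres1]
      by_cases hdup : 1 < full.count c
      · rw [if_pos (hdupTest.mpr hdup)]
        rw [scatter_get (fun rank => c ++ " [" ++ PySem.Int.toStr rank ++ "]") _ _ j (by omega)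
              (by
                intro q hq
                obtain ⟨k, hk, rfl⟩ := (PySem.List.mem_enumerate_iff _ 1 q).mp hq
                have : (pvIdx full 0 c)[k] ∈ pvIdx full 0 c := List.getElem_mem hk
                obtain ⟨m, hm, he, _⟩ := mem_pvIdx this
                simp only [he]; omega)
              (by rw [PySem.List.map_snd_enumerate]; exact nodup_pvIdx full 0 c)]
        by_cases hjc : full[j] = c
        · have := find_rank c full 0 1 j hj hjc
          rw [show (0 : Int) + (j : Int) = (j : Int) by ring] at this
          rw [this, hjc]
          simp [hdup, hjc]
        · have hnone := find_none c full 0 1 (j : Int)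
            (by
              intro k hk hkc hke
              have hkj : k = j := by omega
              subst hkj
              exact hjc hkc)
          rw [hnone]
          simp [hdup, hjc]
      · rw [if_neg (fun hc => hdup (hdupTest.mp hc))]
        simp [hdup]
    rw [hres1j]
    by_cases h1 : full[j] ∈ cs' ∧ 1 < full.count full[j]
    · rw [if_pos h1, if_pos ⟨List.mem_cons_of_mem c h1.1, h1.2⟩]
    · rw [if_neg h1]
      by_cases hjc : full[j] = c
      · by_cases hdup : 1 < full.count full[j]
        · rw [if_pos ⟨hjc ▸ hdup, hjc⟩, if_pos ⟨by rw [hjc]; exact List.mem_cons_self, hdup⟩]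
        · rw [if_neg (fun hc => hdup (by rw [hjc]; exact hc.1)), if_neg (fun hc => hdup hc.2)]
      · rw [if_neg (fun hc => hjc hc.2)]
        rw [if_neg (fun hc => by
          rcases List.mem_cons.mp hc.1 with h | h
          · exact hjc h
          · exact h1 ⟨h, hc.2⟩)]

lemma set_update_nil {α : Type} [BEq α] [LawfulBEq α] (l : List α) :
    PySem.Set.update ([] : PySem.Set α) l = PySem.List.dedup l := rfl

lemma alt_eq_shape (names : List String) : get_enumerated_names_alt names = pvShape names := by
  simp only [get_enumerated_names_alt]
  rw [PySem.List.foldl_prod_mk (fun s e => s ++ [e.2])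
        (fun (d : PySem.Dict String (List Int)) p => d.modify p.2 [] (· ++ [p.1]))
        (PySem.List.enumerate names) [] PySem.Dict.empty]
  rw [show (List.foldl (fun s e => s ++ [e.2]) ([] : List String) (PySem.List.enumerate names))
        = names from by
      rw [PySem.List.foldl_append_singleton_eq_map (fun p => p.2) (PySem.List.enumerate names) []]
      rw [PySem.List.map_snd_enumerate]
      simp]
  set D := List.foldl (fun (d : PySem.Dict String (List Int)) p => d.modify p.2 [] fun x => x ++ [p.1])
      PySem.Dict.empty (PySem.List.enumerate names) with hD
  have hnd : D.keys.Nodup := by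
    rw [hD]
    exact PySem.Dict.nodup_keys_foldl_modify_key (PySem.List.enumerate names) (fun p => p.2) []
      (fun _ p => fun cur => cur ++ [p.1]) PySem.Dict.empty (by simp)
  have hkeys : D.keys = PySem.List.dedup names := by
    rw [hD, PySem.Dict.keys_foldl_modify_key (PySem.List.enumerate names) (fun p => p.2) []
          (fun _ p => fun cur => cur ++ [p.1]) PySem.Dict.empty]
    rw [PySem.List.map_snd_enumerate]
    simp [set_update_nil]
  have hgetD : ∀ c, D.getD c [] = pvIdx names 0 c := by
    intro c
    rw [hD,
      show (List.foldl (fun (d : PySem.Dict String (List Int)) p => d.modify p.2 [] fun x => x ++ [p.1])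
              PySem.Dict.empty (PySem.List.enumerate names))
        = (List.foldl (fun (d : PySem.Dict String (List Int)) q => d.modify q.1 [] fun x => x ++ [q.2])
              PySem.Dict.empty ((PySem.List.enumerate names).map (fun p => (p.2, p.1))))
        from (List.foldl_map (f := fun p : Int × String => (p.2, p.1))
              (g := fun (d : PySem.Dict String (List Int)) q => d.modify q.1 [] fun x => x ++ [q.2])
              (l := PySem.List.enumerate names) (init := PySem.Dict.empty)).symm]
    rw [PySem.Dict.getD_foldl_modify_append, List.filter_map, List.map_map]
    show [] ++ _ = _
    rw [List.nil_append]
    rfl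
  have hitems : D.items = (PySem.List.dedup names).map (fun c => (c, pvIdx names 0 c)) := by
    rw [PySem.Dict.items_eq_map_keys D hnd [], hkeys]
    exact List.map_congr_left (fun c _ => by rw [hgetD c])
  rw [hitems]
  apply List.ext_getElem
  · rw [outer_length names _ rfl]
    simp [pvShape]
  · intro j h1 h2
    have hj : j < names.length := by
      rw [outer_length names _ rfl] at h1; exact h1
    rw [← List.getD_eq_getElem _ "" h1]
    rw [outer_getD names (PySem.List.dedup names) names rfl j hj]
    have hmem : names[j] ∈ names := List.getElem_mem hj
    have hmemdedup : names[j] ∈ PySem.List.dedup names := by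
      simpa [PySem.List.mem_dedup] using hmem
    have hpos : 0 < names.count names[j] := List.count_pos_iff.mpr hmem
    have hshape : (pvShape names)[j] =
        (fun (p : Int × String) =>
          if names.count p.2 = 1 then p.2
          else p.2 ++ " [" ++ PySem.Int.toStr (((PySem.List.slice names none (some (p.1 + 1))).count p.2 : Int)) ++ "]")
          ((0 : Int) + (j : Int), names[j]) := by
      simp only [pvShape]
      rw [List.getElem_map, PySem.List.getElem_enumerate]
    rw [hshape]
    by_cases hone : names.count names[j] = 1
    · have hngt : ¬ 1 < names.count names[j] := by omega
      rw [if_neg (fun hc => hngt hc.2)]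
      simp only [if_pos hone]
      exact List.getD_eq_getElem _ "" hj
    · have hgt : 1 < names.count names[j] := by omega
      rw [if_pos ⟨hmemdedup, hgt⟩]
      simp only [if_neg hone]
      have hb : (0 : Int) + (j : Int) + 1 = ((j + 1 : Nat) : Int) := by push_cast; ring
      rw [hb, PySem.List.slice_to_natCast]
      have htake : names.take (j + 1) = names.take j ++ [names[j]] := by
        rw [List.take_add_one, List.getElem?_eq_getElem hj]
        rfl
      have hceq : (names.take (j + 1)).count names[j] = (names.take j).count names[j] + 1 := by
        rw [htake, List.count_append]
        simp
      have harg : (((names.take (j + 1)).count names[j] : Nat) : Int)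
          = 1 + ((names.take j).count names[j] : Int) := by
        rw [hceq]
        push_cast
        ring
      rw [harg]

-- ===== VERDICT (by name: the statement is the Claim_ definition above) =====
theorem get_enumerated_names_spec : Claim_equal_get_enumerated_names := by
  intro names _
  show get_enumerated_names names = get_enumerated_names_alt names
  rw [A_eq_shape, alt_eq_shape]
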